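-- pv_equiv track=rewrite | github.com/dalboris/rewrap | Rewrap.py | _computePrefix
-- ===== SOURCE A (Python) =====
-- def _computePrefix(string):
--     prefixCharacters = "#/* \t"
--     prefix = ""
--     for c in string:
--         if c in prefixCharacters:
--             prefix += c
--         else:
--             break
--     return prefix
-- ===== SOURCE B (Python) =====
-- def _computePrefix(string):
--     stripped = string.lstrip("#/* \t")
--     return string[:len(string) - len(stripped)]
-- ===== Notes on version B (the rewrite author's own statement) =====
-- stated objective: simpler
-- what changed: Replaces the per-character accumulation loop (with break) by a single lstrip call that removes the leading run of allowed characters, then slices the original string at the resulting boundary.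
import Mathlib
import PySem

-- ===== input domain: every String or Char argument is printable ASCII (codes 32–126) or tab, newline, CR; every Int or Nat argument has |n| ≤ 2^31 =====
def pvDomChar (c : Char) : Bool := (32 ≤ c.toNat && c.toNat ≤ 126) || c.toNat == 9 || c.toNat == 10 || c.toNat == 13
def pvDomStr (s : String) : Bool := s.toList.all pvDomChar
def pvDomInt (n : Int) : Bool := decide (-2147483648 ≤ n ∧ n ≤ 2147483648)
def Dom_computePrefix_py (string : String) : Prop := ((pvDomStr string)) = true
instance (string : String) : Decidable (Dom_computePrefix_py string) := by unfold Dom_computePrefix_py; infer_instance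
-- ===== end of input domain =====

-- B replaces A's per-character accumulation loop by lstrip-then-slice (objective: simpler).


-- ===== PORT A =====
-- loop 'for c in string: if c in prefixCharacters: prefix += c else: break'
-- ('c in prefixCharacters' for a single char is membership; ported as list contains — exact)
def computePrefixGoA : List Char → String → String
  | [], pr => pr
  | c :: rest, pr =>
      if ("#/* \t".toList.contains c) then computePrefixGoA rest (pr ++ String.ofList [c])
      else pr

def computePrefix_py (string : String) : String :=
  computePrefixGoA string.toList ""

-- ===== PORT B =====
-- stripped = string.lstrip("#/* \t")  — lstrip with a chars argument is not in PySem;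
-- hand-ported as dropWhile membership, which is exactly Python's lstrip(chars).
-- return string[:len(string) - len(stripped)]
def computePrefix_py_alt (string : String) : String :=
  let cs := string.toList
  let stripped := cs.dropWhile (fun c => "#/* \t".toList.contains c)
  String.ofList (PySem.List.slice cs none (some ((cs.length : Int) - (stripped.length : Int))))

-- ===== PRECONDITION & SPEC =====
def Spec_computePrefix_py (string : String) (out : String) : Prop := out = computePrefix_py_alt string
instance (string : String) (out : String) : Decidable (Spec_computePrefix_py string out) := by unfold Spec_computePrefix_py; infer_instance

-- ===== CLAIM (what is proved, stated in full; the proofs are below) =====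
def Claim_equal_computePrefix_py : Prop := ∀ (string : String), Dom_computePrefix_py string → Spec_computePrefix_py string (computePrefix_py string)

-- ===== LEMMAS AND PROOFS =====

theorem computePrefixGoA_eq (cs : List Char) (pr : String) :
    computePrefixGoA cs pr = String.ofList (pr.toList ++ cs.takeWhile (fun c => "#/* \t".toList.contains c)) := by
  induction cs generalizing pr with
  | nil => simp [computePrefixGoA]
  | cons c rest ih =>
      by_cases h : ("#/* \t".toList.contains c) = true
      · rw [show computePrefixGoA (c :: rest) pr
              = computePrefixGoA rest (pr ++ String.ofList [c]) from by
                simp only [computePrefixGoA]; rw [if_pos h],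
            ih, List.takeWhile_cons_of_pos h]
        simp only [String.toList_append, String.toList_ofList, List.append_assoc,
          List.singleton_append]
      · rw [show computePrefixGoA (c :: rest) pr = pr from by
                simp only [computePrefixGoA]; rw [if_neg h],
            List.takeWhile_cons_of_neg (by simpa using h)]
        simp

theorem take_sub_dropWhile (cs : List Char) (p : Char → Bool) :
    cs.take (cs.length - (cs.dropWhile p).length) = cs.takeWhile p := by
  have hlen : cs.length = (cs.takeWhile p).length + (cs.dropWhile p).length := by
    rw [← List.length_append, List.takeWhile_append_dropWhile]
  rw [hlen]
  simp only [Nat.add_sub_cancel]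
  have hpre : cs.takeWhile p <+: cs := List.takeWhile_prefix p
  exact (List.prefix_iff_eq_take.mp hpre).symm

-- ===== VERDICT (by name: the statement is the Claim_ definition above) =====
theorem computePrefix_py_spec : Claim_equal_computePrefix_py := by
  intro s _
  show computePrefix_py s = computePrefix_py_alt s
  unfold computePrefix_py computePrefix_py_alt
  rw [computePrefixGoA_eq]
  have hle : (s.toList.dropWhile (fun c => "#/* \t".toList.contains c)).length ≤ s.toList.length :=
    List.length_dropWhile_le _ _
  have hcast : ((s.toList.length : Int) - ((s.toList.dropWhile (fun c => "#/* \t".toList.contains c)).length : Int))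
      = ((s.toList.length - (s.toList.dropWhile (fun c => "#/* \t".toList.contains c)).length : Nat) : Int) := by
    omega
  simp only [hcast, PySem.List.slice_to_natCast, take_sub_dropWhile]
  simp
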